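-- pv_equiv track=rewrite | github.com/mlaugharn/swatch | swatch.py | tally_colors
-- ===== SOURCE A (Python) =====
-- def trunctriple(triple, resolution):
--     return [(singleton // resolution) * resolution for singleton in triple]
--
-- def tally_colors(image, resolution):
--     output = {}
--     height = len(image)
--     width = len(image[0])
--     for y in range(height):
--         for x in range(width):
--             # no alpha values please
--             pixel = tuple(trunctriple(image[y][x][:3], resolution))
--             if pixel in output:
--                 output[pixel] += 1
--             else:
--                 output[pixel] = 1
--     return output
-- ===== SOURCE B (Python) =====
-- def tally_colors(image, resolution):
--     width = len(image[0])
--     keys = [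
--         tuple((c // resolution) * resolution for c in row[x][:3])
--         for row in image
--         for x in range(width)
--     ]
--     return {k: keys.count(k) for k in dict.fromkeys(keys)}
-- ===== Notes on version B (the rewrite author's own statement) =====
-- stated objective: alternative
-- what changed: Replaces the nested y/x index loops with an incremental counting dict by a flatten-then-aggregate decomposition: build the flat list of truncated pixel keys once, then produce the histogram as a comprehension over the first-occurrence dedup (dict.fromkeys) with list.count per distinct key.
import Mathlib
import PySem

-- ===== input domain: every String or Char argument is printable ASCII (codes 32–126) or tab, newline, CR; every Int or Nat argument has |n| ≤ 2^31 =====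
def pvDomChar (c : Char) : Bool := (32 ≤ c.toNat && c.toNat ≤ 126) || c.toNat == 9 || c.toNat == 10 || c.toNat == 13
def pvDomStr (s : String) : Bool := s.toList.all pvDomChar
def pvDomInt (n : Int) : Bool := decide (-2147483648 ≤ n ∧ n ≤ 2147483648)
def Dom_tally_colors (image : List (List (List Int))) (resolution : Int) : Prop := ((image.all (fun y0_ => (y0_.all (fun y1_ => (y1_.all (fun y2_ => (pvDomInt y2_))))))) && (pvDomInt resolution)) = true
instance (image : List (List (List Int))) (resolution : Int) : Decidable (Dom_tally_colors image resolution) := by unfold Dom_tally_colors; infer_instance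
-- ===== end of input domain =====

-- B rebuilds the histogram by flattening the truncated pixel keys once, deduplicating
-- (dict.fromkeys order = first occurrence) and counting each distinct key; same dict as A.

-- ===== PORT A =====
def trunctriple (triple : List Int) (resolution : Int) : List Int :=
  triple.map (fun singleton => (PySem.Int.floordiv singleton resolution) * resolution)

def tally_colors (image : List (List (List Int))) (resolution : Int) : List (List Int × Int) :=
  let height : Int := (image.length : Int)
  let width : Int := ((PySem.List.pyGetD image 0 ([] : List (List Int))).length : Int)
  (((PySem.List.pyRange 0 height 1).foldl (fun output y =>
      (PySem.List.pyRange 0 width 1).foldl (fun output x =>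
        let pixel : List Int :=
          trunctriple (PySem.List.slice (PySem.List.pyGetD (PySem.List.pyGetD image y ([] : List (List Int))) x ([] : List Int)) none (some 3)) resolution
        if output.contains pixel then
          output.insert pixel (output.getD pixel 0 + 1)
        else
          output.insert pixel 1) output)
    (PySem.Dict.empty : PySem.Dict (List Int) Int))).items

-- ===== PORT B =====
def tally_colors_alt (image : List (List (List Int))) (resolution : Int) : List (List Int × Int) :=
  let width : Int := ((PySem.List.pyGetD image 0 ([] : List (List Int))).length : Int)
  let keys : List (List Int) :=
    image.flatMap (fun row =>
      (PySem.List.pyRange 0 width 1).map (fun x =>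
        (PySem.List.slice (PySem.List.pyGetD row x ([] : List Int)) none (some 3)).map
          (fun c => (PySem.Int.floordiv c resolution) * resolution)))
  (PySem.List.dedup keys).map (fun k => (k, (keys.count k : Int)))

-- ===== PRECONDITION & SPEC =====
-- Pre_ excludes exactly the inputs where the Python A raises: an empty image (IndexError on
-- image[0]), rows shorter than the first row (IndexError on image[y][x]), and resolution = 0
-- when there is at least one pixel (ZeroDivisionError; with a zero-width image no division runs).
def Pre_tally_colors (image : List (List (List Int))) (resolution : Int) : Prop :=
  image ≠ [] ∧ (∀ row ∈ image, (image.headD []).length ≤ row.length) ∧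
    (resolution ≠ 0 ∨ (image.headD []).length = 0)
instance (image : List (List (List Int))) (resolution : Int) : Decidable (Pre_tally_colors image resolution) := by unfold Pre_tally_colors; infer_instance

def pvWitness_tally_colors : List (List (List Int)) × Int := ([[[10, 21, 33]], [[10, 20, 30], [4, 5, 6, 200]]], 8)

def Spec_tally_colors (image : List (List (List Int))) (resolution : Int) (out : List (List Int × Int)) : Prop := out = tally_colors_alt image resolution
instance (image : List (List (List Int))) (resolution : Int) (out : List (List Int × Int)) : Decidable (Spec_tally_colors image resolution out) := by unfold Spec_tally_colors; infer_instance

-- ===== CLAIM (what is proved, stated in full; the proofs are below) =====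
def Claim_equal_tally_colors : Prop := ∀ (image : List (List (List Int))) (resolution : Int), Dom_tally_colors image resolution → Pre_tally_colors image resolution → Spec_tally_colors image resolution (tally_colors image resolution)

-- ===== LEMMAS AND PROOFS =====

-- folding a step over a flatMap = folding the inner lists row by row
theorem foldl_flatMap_eq {α β γ : Type} (l : List α) (g : α → List β) (f : γ → β → γ) (init : γ) :
    (l.flatMap g).foldl f init = l.foldl (fun acc row => (g row).foldl f acc) init := by
  induction l generalizing init with
  | nil => rfl
  | cons x xs ih => simp [List.flatMap_cons, List.foldl_append, ih]

-- A's branch on membership is extensionally the counting insert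
theorem step_eq (d : PySem.Dict (List Int) Int) (k : List Int) :
    (if d.contains k then d.insert k (d.getD k 0 + 1) else d.insert k 1) = d.insert k (d.getD k 0 + 1) := by
  by_cases h : d.contains k = true
  · simp [h]
  · simp only [Bool.not_eq_true] at h
    rw [PySem.Dict.getD_of_not_contains d 0 h]
    simp [h]

-- ===== VERDICT (by name: the statement is the Claim_ definition above) =====
theorem tally_colors_spec : Claim_equal_tally_colors := by
  intro image resolution _ _
  unfold Spec_tally_colors tally_colors tally_colors_alt
  simp only []
  set key : List Int → List Int := fun l =>
    (PySem.List.slice l none (some 3)).map (fun c => (PySem.Int.floordiv c resolution) * resolution) with hkey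
  set w : Int := ((PySem.List.pyGetD image 0 ([] : List (List Int))).length : Int) with hw
  set keys : List (List Int) :=
    image.flatMap (fun row => (PySem.List.pyRange 0 w 1).map (fun x => key (PySem.List.pyGetD row x ([] : List Int)))) with hkeys
  have hstep : ∀ (d : PySem.Dict (List Int) Int) (y : Int),
      (PySem.List.pyRange 0 w 1).foldl (fun output x =>
        if output.contains (trunctriple (PySem.List.slice (PySem.List.pyGetD (PySem.List.pyGetD image y ([] : List (List Int))) x ([] : List Int)) none (some 3)) resolution)
        then output.insert (trunctriple (PySem.List.slice (PySem.List.pyGetD (PySem.List.pyGetD image y ([] : List (List Int))) x ([] : List Int)) none (some 3)) resolution)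
              (output.getD (trunctriple (PySem.List.slice (PySem.List.pyGetD (PySem.List.pyGetD image y ([] : List (List Int))) x ([] : List Int)) none (some 3)) resolution) 0 + 1)
        else output.insert (trunctriple (PySem.List.slice (PySem.List.pyGetD (PySem.List.pyGetD image y ([] : List (List Int))) x ([] : List Int)) none (some 3)) resolution) 1) d
      = ((PySem.List.pyRange 0 w 1).map (fun x => key (PySem.List.pyGetD (PySem.List.pyGetD image y ([] : List (List Int))) x ([] : List Int)))).foldl
          (fun d k => d.insert k (d.getD k 0 + 1)) d := by
    intro d y
    rw [List.foldl_map]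
    exact PySem.List.foldl_congr_mem _ _ _ _ (fun acc x _ => step_eq acc _)
  calc ((PySem.List.pyRange 0 (image.length : Int) 1).foldl (fun output y =>
          (PySem.List.pyRange 0 w 1).foldl (fun output x =>
            if output.contains (trunctriple (PySem.List.slice (PySem.List.pyGetD (PySem.List.pyGetD image y ([] : List (List Int))) x ([] : List Int)) none (some 3)) resolution)
            then output.insert (trunctriple (PySem.List.slice (PySem.List.pyGetD (PySem.List.pyGetD image y ([] : List (List Int))) x ([] : List Int)) none (some 3)) resolution)
                  (output.getD (trunctriple (PySem.List.slice (PySem.List.pyGetD (PySem.List.pyGetD image y ([] : List (List Int))) x ([] : List Int)) none (some 3)) resolution) 0 + 1)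
            else output.insert (trunctriple (PySem.List.slice (PySem.List.pyGetD (PySem.List.pyGetD image y ([] : List (List Int))) x ([] : List Int)) none (some 3)) resolution) 1) output)
          (PySem.Dict.empty : PySem.Dict (List Int) Int)).items
      = (keys.foldl (fun d k => d.insert k (d.getD k 0 + 1)) PySem.Dict.empty).items := by
        rw [PySem.List.foldl_congr_mem _ _ _ _ (fun acc y _ => hstep acc y),
            PySem.List.foldl_pyRange_zero_pyGetD' image ([] : List (List Int))
              (fun d row => ((PySem.List.pyRange 0 w 1).map (fun x => key (PySem.List.pyGetD row x ([] : List Int)))).foldl (fun d k => d.insert k (d.getD k 0 + 1)) d)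
              (PySem.Dict.empty : PySem.Dict (List Int) Int),
            hkeys, foldl_flatMap_eq]
    _ = (PySem.List.dedup keys).map (fun k => (k, (keys.count k : Int))) := by
        rw [PySem.Dict.foldl_insert_getD_add_one_eq_counter, PySem.Dict.items_counter]
        simp [PySem.List.dedup_eq_ofList]
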